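-- pv_equiv track=rewrite | github.com/Cthupby/test-tasks | Stepik/stepik_bioinformatics_cource.py | get_list_a
-- ===== SOURCE A (Python) =====
-- def get_list_a(a):
--     if a == 1 or a == 0:
--         return [a]
--     sum_a = 1
--     list_a = []
--
--     for i in range(1, a + 1):
--         while sum_a < a:
--             sum_a += i
--             list_a += [i] * i
--             break
--
--     len_a = len(list_a)
--     if len_a > a:
--         list_a = list_a[:(a - len_a)]
--     elif len_a < a:
--         list_a += [int(list_a[-1]) + 1] * (a - len_a)
--
--     return list_a
-- ===== SOURCE B (Python) =====
-- def get_list_a(a):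
--     res = []
--     val = 0
--     rem = 0
--     for _ in range(a):
--         if rem == 0:
--             val += 1
--             rem = val
--         res.append(val)
--         rem -= 1
--     return res
-- ===== Notes on version B (the rewrite author's own statement) =====
-- stated objective: simpler
-- what changed: B replaces A's block-building loop with a running sum plus a final truncate/pad fix-up by a single streaming loop that emits one element per index from a (value, remaining) counter pair, with no length correction; B also drops A's a==0 special case (declared as D_).
-- intended difference: On a == 0 A returns [0] (its a==0/a==1 guard returns [a]) while B returns [], which is the intended length-0 prefix of the sequence 1,2,2,3,3,3,... — e.g. on get_list_a(0): A returns [0], B returns []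
import Mathlib
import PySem

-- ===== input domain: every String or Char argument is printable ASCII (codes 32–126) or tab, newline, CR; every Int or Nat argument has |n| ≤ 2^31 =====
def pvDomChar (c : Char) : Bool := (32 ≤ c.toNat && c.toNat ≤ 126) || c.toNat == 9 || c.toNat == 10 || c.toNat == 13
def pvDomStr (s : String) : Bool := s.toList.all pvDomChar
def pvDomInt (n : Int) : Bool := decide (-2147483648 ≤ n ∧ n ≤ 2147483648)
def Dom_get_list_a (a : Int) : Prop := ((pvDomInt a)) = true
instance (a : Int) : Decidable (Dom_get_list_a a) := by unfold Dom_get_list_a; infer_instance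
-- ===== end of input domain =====

-- B builds the length-a prefix of 1,2,2,3,3,3,… with one streaming loop (value/remaining
-- counters) instead of A's block accumulation plus truncate/pad; B returns [] (not [0]) at a==0.

-- ===== PORT A =====
-- int(list_a[-1]) in A is reached only with list_a nonempty (it never raises);
-- ported as pyGetD with default 0, exact on every reachable state.
def get_list_a (a : Int) : List Int :=
  if a = 1 ∨ a = 0 then [a]
  else
    let st := (PySem.List.pyRange 1 (a+1) 1).foldl
      (fun (st : Int × List Int) i =>
        if st.1 < a then (st.1 + i, st.2 ++ List.replicate i.toNat i) else st)
      (1, [])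
    let list_a := st.2
    let len_a : Int := list_a.length
    if len_a > a then PySem.List.slice list_a none (some (a - len_a))
    else if len_a < a then
      list_a ++ List.replicate (a - len_a).toNat (PySem.List.pyGetD list_a (-1) 0 + 1)
    else list_a

-- ===== PORT B =====
def get_list_a_alt (a : Int) : List Int :=
  ((PySem.List.pyRange 0 a 1).foldl
    (fun (st : List Int × Int × Int) _ =>
      let res := st.1
      let val := st.2.1
      let rem := st.2.2
      let vr := if rem = 0 then (val + 1, val + 1) else (val, rem)
      (res ++ [vr.1], vr.1, vr.2 - 1))
    ([], 0, 0)).1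

-- ===== PRECONDITION & SPEC =====
-- On a == 0 A returns [0] while B returns [], the intended length-0 prefix of 1,2,2,3,3,3,…
def D_get_list_a (a : Int) : Prop := a = 0
instance (a : Int) : Decidable (D_get_list_a a) := by unfold D_get_list_a; infer_instance
def Spec_get_list_a (a : Int) (out : List Int) : Prop := ¬ D_get_list_a a → out = get_list_a_alt a
instance (a : Int) (out : List Int) : Decidable (Spec_get_list_a a out) := by unfold Spec_get_list_a; infer_instance
def pvDiffWitness_get_list_a : Int := 0
def pvDiffWitnessOut_get_list_a : (List Int) × (List Int) := ([0], [])

-- ===== CLAIM (what is proved, stated in full; the proofs are below) =====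
def Claim_unchanged_get_list_a : Prop := ∀ (a : Int), Dom_get_list_a a → Spec_get_list_a a (get_list_a a)
def Claim_changed_get_list_a : Prop := Dom_get_list_a (pvDiffWitness_get_list_a) ∧ D_get_list_a (pvDiffWitness_get_list_a) ∧ get_list_a (pvDiffWitness_get_list_a) = pvDiffWitnessOut_get_list_a.1 ∧ get_list_a_alt (pvDiffWitness_get_list_a) = pvDiffWitnessOut_get_list_a.2 ∧ pvDiffWitnessOut_get_list_a.1 ≠ pvDiffWitnessOut_get_list_a.2
def Claim_exact_get_list_a : Prop := ∀ (a : Int), Dom_get_list_a a → D_get_list_a a → get_list_a a ≠ get_list_a_alt a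

-- ===== LEMMAS AND PROOFS =====

-- the infinite sequence's canonical prefixes by whole blocks: pvBlocks k = [1] ++ [2,2] ++ … ++ [k,…,k]
def pvBlocks : Nat → List Int
  | 0 => []
  | k+1 => pvBlocks k ++ List.replicate (k+1) ((k : Int)+1)

theorem pvBlocks_le_length : ∀ k : Nat, k ≤ (pvBlocks k).length := by
  intro k
  induction k with
  | zero => simp [pvBlocks]
  | succ k ih => simp only [pvBlocks, List.length_append, List.length_replicate]; omega

theorem pvBlocks_prefix : ∀ (j k : Nat), j ≤ k → pvBlocks j <+: pvBlocks k := by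
  intro j k h
  induction k with
  | zero => simp_all
  | succ k ih =>
    rcases Nat.lt_or_ge j (k+1) with h' | h'
    · exact (ih (by omega)).trans ⟨List.replicate (k+1) ((k:Int)+1), rfl⟩
    · have : j = k+1 := by omega
      subst this; exact List.prefix_refl _

theorem pvBlocks_take_le {j k : Nat} (hjk : j ≤ k) (n : Nat) (hn : n ≤ (pvBlocks j).length) :
    (pvBlocks k).take n = (pvBlocks j).take n := by
  obtain ⟨t, ht⟩ := pvBlocks_prefix j k hjk
  rw [← ht, List.take_append]
  simp [Nat.sub_eq_zero_of_le hn]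

theorem pvBlocks_take_eq (j k n : Nat) (hj : n ≤ (pvBlocks j).length)
    (hk : n ≤ (pvBlocks k).length) : (pvBlocks j).take n = (pvBlocks k).take n := by
  rcases Nat.le_total j k with h | h
  · exact (pvBlocks_take_le h n hj).symm
  · exact pvBlocks_take_le h n hk

theorem pvBlocks_last (k : Nat) (hk : 1 ≤ k) (d : Int) :
    PySem.List.pyGetD (pvBlocks k) (-1) d = (k : Int) := by
  obtain ⟨k, rfl⟩ := Nat.exists_eq_add_of_le hk
  have : pvBlocks (1 + k) = (pvBlocks k ++ List.replicate k ((k:Int)+1)) ++ [(k:Int)+1] := by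
    have h1 : 1 + k = k + 1 := by omega
    rw [h1]
    show pvBlocks k ++ List.replicate (k+1) ((k:Int)+1) = _
    rw [List.replicate_succ' (n := k)]
    simp
  rw [this, PySem.List.pyGetD_neg_one_append_singleton]
  push_cast; ring

-- A's loop, once the sum has reached a, never changes its state again
theorem pvFrozenA (a : Int) : ∀ (l : List Int) (st : Int × List Int), a ≤ st.1 →
    l.foldl (fun (st : Int × List Int) i =>
        if st.1 < a then (st.1 + i, st.2 ++ List.replicate i.toNat i) else st) st = st := by
  intro l
  induction l with
  | nil => intro st _; rfl
  | cons x l ih =>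
    intro st h
    have : ¬ st.1 < a := by omega
    simp only [List.foldl_cons, if_neg this]
    exact ih st h

-- A's loop from state (1 + |blocks j|, blocks j) over the remaining range ends in a block state
theorem pvRunA (a : Int) : ∀ (n j : Nat), (j : Int) + (n : Int) = a →
    ∃ k : Nat,
      (PySem.List.pyRange ((j:Int)+1) (a+1) 1).foldl
        (fun (st : Int × List Int) i =>
          if st.1 < a then (st.1 + i, st.2 ++ List.replicate i.toNat i) else st)
        (1 + ((pvBlocks j).length : Int), pvBlocks j)
      = (1 + ((pvBlocks k).length : Int), pvBlocks k)
      ∧ j ≤ k ∧ a ≤ 1 + ((pvBlocks k).length : Int)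
      ∧ (1 + ((pvBlocks j).length : Int) < a → j < k) := by
  intro n
  induction n with
  | zero =>
    intro j hj
    refine ⟨j, ?_, le_refl _, ?_, ?_⟩
    · rw [PySem.List.pyRange_one_eq_nil (by omega)]; rfl
    · have := pvBlocks_le_length j; omega
    · have := pvBlocks_le_length j; omega
  | succ n ih =>
    intro j hj
    have hlt : (j : Int) + 1 < a + 1 := by push_cast at hj ⊢; omega
    rw [PySem.List.pyRange_one_cons hlt, List.foldl_cons]
    by_cases hc : 1 + ((pvBlocks j).length : Int) < a
    · rw [if_pos hc]
      have ht : ((j:Int)+1).toNat = j + 1 := by omega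
      have hb : pvBlocks (j+1) = pvBlocks j ++ List.replicate (j+1) ((j:Int)+1) := rfl
      have hlen : (pvBlocks (j+1)).length = (pvBlocks j).length + (j+1) := by
        simp [pvBlocks]
      have hstep : (1 + ((pvBlocks j).length : Int) + ((j:Int)+1),
          pvBlocks j ++ List.replicate ((j:Int)+1).toNat ((j:Int)+1))
          = (1 + ((pvBlocks (j+1)).length : Int), pvBlocks (j+1)) := by
        rw [ht, ← hb]
        congr 1
        rw [hlen]; push_cast [hlen]; ring
      rw [hstep]
      have hj' : ((j+1 : Nat) : Int) + (n : Int) = a := by push_cast at hj ⊢; omega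
      obtain ⟨k, hfold, hk1, hk2, _⟩ := ih (j+1) hj'
      have hcast : ((j:Int)+1) + 1 = ((j+1 : Nat) : Int) + 1 := by push_cast; ring
      rw [hcast]
      exact ⟨k, hfold, by omega, hk2, fun _ => by omega⟩
    · rw [if_neg hc]
      rw [pvFrozenA a _ _ (by omega)]
      exact ⟨j, rfl, le_refl _, by omega, fun h => absurd h hc⟩

-- B's loop invariant: res is always a prefix of a block list, with rem copies of val pending
theorem pvRunB : ∀ (l : List Int) (res : List Int) (val rem : Int) (v : Nat),
    val = (v : Int) → 0 ≤ rem →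
    res ++ List.replicate rem.toNat val = pvBlocks v →
    ∃ (res' : List Int) (v' : Nat) (rem' : Int),
      l.foldl (fun (st : List Int × Int × Int) _ =>
          let res := st.1
          let val := st.2.1
          let rem := st.2.2
          let vr := if rem = 0 then (val + 1, val + 1) else (val, rem)
          (res ++ [vr.1], vr.1, vr.2 - 1)) (res, val, rem)
        = (res', (v' : Int), rem')
      ∧ 0 ≤ rem'
      ∧ res' ++ List.replicate rem'.toNat (v' : Int) = pvBlocks v'
      ∧ res'.length = res.length + l.length := by
  intro l
  induction l with
  | nil =>
    intro res val rem v hv hrem hinv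
    exact ⟨res, v, rem, by rw [hv]; rfl, hrem, by rw [← hv]; exact hinv, by simp⟩
  | cons x l ih =>
    intro res val rem v hv hrem hinv
    by_cases h0 : rem = 0
    · subst h0
      simp only [Int.toNat_zero, List.replicate_zero, List.append_nil] at hinv
      simp only [List.foldl_cons]
      have hinv' : (res ++ [val + 1]) ++ List.replicate ((val + 1) - 1).toNat (val + 1)
          = pvBlocks (v + 1) := by
        have ht : ((val + 1) - 1).toNat = v := by omega
        rw [ht]
        have hb : pvBlocks (v+1) = pvBlocks v ++ List.replicate (v+1) ((v:Int)+1) := rfl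
        rw [hb, ← hinv, List.append_assoc]
        congr 1
        rw [List.replicate_succ]
        simp [hv]
      obtain ⟨res', v', rem', hfold, h1, h2, h3⟩ :=
        ih (res ++ [val + 1]) (val + 1) ((val + 1) - 1) (v+1) (by push_cast; omega)
          (by omega) hinv'
      exact ⟨res', v', rem', hfold, h1, h2, by simp at h3 ⊢; omega⟩
    · simp only [List.foldl_cons, if_neg h0]
      have hinv' : (res ++ [val]) ++ List.replicate (rem - 1).toNat val = pvBlocks v := by
        rw [← hinv, List.append_assoc]
        congr 1
        have hr : rem.toNat = (rem - 1).toNat + 1 := by omega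
        rw [hr, List.replicate_succ]
        rfl
      obtain ⟨res', v', rem', hfold, h1, h2, h3⟩ :=
        ih (res ++ [val]) val (rem - 1) v hv (by omega) hinv'
      exact ⟨res', v', rem', hfold, h1, h2, by simp at h3 ⊢; omega⟩

-- B returns a take of a block list of length a.toNat
theorem pvB_take (a : Int) : ∃ v : Nat, a.toNat ≤ (pvBlocks v).length ∧
    get_list_a_alt a = (pvBlocks v).take a.toNat := by
  obtain ⟨res', v', rem', hfold, _, hinv, hlen⟩ :=
    pvRunB (PySem.List.pyRange 0 a 1) [] 0 0 0 rfl (by omega) (by simp [pvBlocks])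
  have hlen' : res'.length = a.toNat := by
    rw [hlen]; simp [PySem.List.length_pyRange_one]
  refine ⟨v', ?_, ?_⟩
  · have := congrArg List.length hinv
    simp at this; omega
  · have : get_list_a_alt a = res' := by
      unfold get_list_a_alt; rw [hfold]
    rw [this, ← hlen', ← hinv, List.take_left]

-- A, for a ≥ 2, returns a take of a block list
theorem pvA_take (a : Int) (ha : 2 ≤ a) : ∃ k : Nat, a.toNat ≤ (pvBlocks k).length ∧
    get_list_a a = (pvBlocks k).take a.toNat := by
  have hne : ¬ (a = 1 ∨ a = 0) := by omega
  have h0 : ((0 : Nat) : Int) + (a.toNat : Int) = a := by omega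
  obtain ⟨k, hfold, _, hsum, hgrow⟩ := pvRunA a a.toNat 0 h0
  have hk1 : 1 ≤ k := by
    apply hgrow
    simp [pvBlocks]; omega
  have hfold' : (PySem.List.pyRange 1 (a+1) 1).foldl
      (fun (st : Int × List Int) i =>
        if st.1 < a then (st.1 + i, st.2 ++ List.replicate i.toNat i) else st) (1, [])
      = (1 + ((pvBlocks k).length : Int), pvBlocks k) := by
    have h01 : ((0:Nat) : Int) + 1 = (1 : Int) := by norm_num
    rw [h01] at hfold
    simpa [pvBlocks] using hfold
  have hLa : a - 1 ≤ ((pvBlocks k).length : Int) := by omega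
  refine ⟨k + 1, ?_, ?_⟩
  · have hb : (pvBlocks (k+1)).length = (pvBlocks k).length + (k+1) := by simp [pvBlocks]
    omega
  · unfold get_list_a
    rw [if_neg hne]
    simp only [hfold']
    by_cases hgt : ((pvBlocks k).length : Int) > a
    · rw [if_pos hgt]
      have hkk : (0:Nat) < (pvBlocks k).length - a.toNat := by omega
      have hcast : a - ((pvBlocks k).length : Int)
          = -((((pvBlocks k).length - a.toNat : Nat)) : Int) := by omega
      rw [hcast, PySem.List.slice_to_neg_natCast _ _ hkk]
      have : (pvBlocks k).length - ((pvBlocks k).length - a.toNat) = a.toNat := by omega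
      rw [this]
      exact (pvBlocks_take_le (j := k) (k := k+1) (by omega) a.toNat (by omega)).symm
    · by_cases hlt : ((pvBlocks k).length : Int) < a
      · rw [if_neg hgt, if_pos hlt]
        have hlen : ((pvBlocks k).length : Int) = a - 1 := by omega
        have h1 : (a - ((pvBlocks k).length : Int)).toNat = 1 := by omega
        rw [h1, pvBlocks_last k hk1]
        have hb : pvBlocks (k+1) = pvBlocks k ++ List.replicate (k+1) ((k:Int)+1) := rfl
        have h2 : a.toNat = (pvBlocks k).length + 1 := by omega
        rw [h2, hb, List.take_append]
        simp [List.take_replicate]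
      · rw [if_neg hgt, if_neg hlt]
        have hlen : ((pvBlocks k).length : Int) = a := by omega
        have : a.toNat = (pvBlocks k).length := by omega
        rw [this]
        conv_lhs => rw [← List.take_length (l := pvBlocks k)]
        exact (pvBlocks_take_le (j := k) (k := k+1) (by omega) _ (by omega)).symm

-- ===== VERDICT (by name: the statement is the Claim_ definition above) =====
theorem get_list_a_spec : Claim_unchanged_get_list_a := by
  intro a _ hD
  have ha0 : a ≠ 0 := hD
  show get_list_a a = get_list_a_alt a
  rcases lt_trichotomy a 0 with hneg | h0 | hpos
  · -- a < 0: both loops run over empty ranges; A truncates [] to []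
    have hA : get_list_a a = [] := by
      unfold get_list_a
      rw [if_neg (by omega), PySem.List.pyRange_one_eq_nil (by omega)]
      simp only [List.foldl_nil]
      rw [if_pos (by simp; omega)]
      simp [PySem.List.slice, PySem.List.clampIdx]
    have hB : get_list_a_alt a = [] := by
      unfold get_list_a_alt
      rw [PySem.List.pyRange_one_eq_nil (by omega)]
      rfl
    rw [hA, hB]
  · exact absurd h0 ha0
  · rcases eq_or_lt_of_le (by omega : (1:Int) ≤ a) with h1 | h2
    · rw [← h1]; decide
    · obtain ⟨k, hka, hA⟩ := pvA_take a (by omega)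
      obtain ⟨v, hva, hB⟩ := pvB_take a
      rw [hA, hB]
      exact pvBlocks_take_eq k v a.toNat hka hva

theorem get_list_a_changed : Claim_changed_get_list_a := by
  unfold Claim_changed_get_list_a; decide

theorem get_list_a_tight : Claim_exact_get_list_a := by
  intro a _ hD
  unfold D_get_list_a at hD
  subst hD
  decide
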